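-- pv_equiv track=rewrite | github.com/alisartazkhan/csc496spring2024 | a2-N/schulze.py | find_strongest_path
-- ===== SOURCE A (Python) =====
-- from typing import Dict, List, Tuple, Hashable, Optional, Set
-- from typing import List, Dict, Hashable, Set, Any, Tuple
--
-- def find_strongest_path(start: Hashable, end: Hashable, graph: Dict[Hashable, Dict[Hashable, int]],
--                         min_strength: Any,
--                         visited: Set[Hashable]) -> int:
--     if start == end:
--         return min_strength
--     if start not in graph or start in visited:
--         return 0
--
--     visited.add(start)
--     all_strengths: List[int] = []
--
--     max_edge_strength: int = max(graph[start].values())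
--
--     for n in graph[start]:
--         strength = graph[start][n]
--         if n not in visited:
--             new_strength: int = min(min_strength, strength) if min_strength is not None else strength
--             path_strength: int = find_strongest_path(n, end, graph, new_strength, visited)
--             if path_strength > 0:
--                 all_strengths.append(path_strength)
--
--     visited.remove(start)
--
--     if len(all_strengths) != 0:
--         return max(all_strengths)
--     else:
--         return 0
-- ===== SOURCE B (Python) =====
-- def find_strongest_path(start, end, graph, min_strength, visited):
--     if start == end:
--         return min_strength
--     if start not in graph or start in visited:
--         return 0
--     # graph nodes reachable from start without passing through `visited` or `end`
--     reach = [start]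
--     seen = {start}
--     i = 0
--     while i < len(reach):
--         u = reach[i]
--         i += 1
--         for v in graph[u]:
--             if v in graph and v != end and v not in visited and v not in seen:
--                 seen.add(v)
--                 reach.append(v)
--     # Bellman-Ford-style value iteration on the reachable subgraph:
--     # after round k, b[u] is the best bottleneck of a walk u -> end (avoiding
--     # `visited`) that uses at most k edges.
--     b = {}
--     for _ in range(len(reach)):
--         nb = {}
--         for u in reach:
--             best = None
--             for v, w in graph[u].items():
--                 if v in visited:
--                     continue
--                 if v == end:
--                     c = w
--                 elif v in b:
--                     c = min(w, b[v])
--                 else: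
--                     continue
--                 if best is None or c > best:
--                     best = c
--             if best is not None:
--                 nb[u] = best
--         b = nb
--     if start not in b:
--         return 0
--     v = b[start] if min_strength is None else min(min_strength, b[start])
--     return v if v > 0 else 0
-- ===== Notes on version B (the rewrite author's own statement) =====
-- stated objective: alternative
-- what changed: Replaces A's recursive DFS enumeration of all simple paths by a BFS to the reachable subgraph followed by a Bellman-Ford-style value iteration (len(reach) rounds over a dict) computing the maximum-bottleneck value of a walk to end, capped by min_strength and clamped at 0.
-- outside the precondition, e.g. on find_strongest_path(1, 1, {1: {2: 5}}, None, set()): A returns None, B returns None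
import Mathlib
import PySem

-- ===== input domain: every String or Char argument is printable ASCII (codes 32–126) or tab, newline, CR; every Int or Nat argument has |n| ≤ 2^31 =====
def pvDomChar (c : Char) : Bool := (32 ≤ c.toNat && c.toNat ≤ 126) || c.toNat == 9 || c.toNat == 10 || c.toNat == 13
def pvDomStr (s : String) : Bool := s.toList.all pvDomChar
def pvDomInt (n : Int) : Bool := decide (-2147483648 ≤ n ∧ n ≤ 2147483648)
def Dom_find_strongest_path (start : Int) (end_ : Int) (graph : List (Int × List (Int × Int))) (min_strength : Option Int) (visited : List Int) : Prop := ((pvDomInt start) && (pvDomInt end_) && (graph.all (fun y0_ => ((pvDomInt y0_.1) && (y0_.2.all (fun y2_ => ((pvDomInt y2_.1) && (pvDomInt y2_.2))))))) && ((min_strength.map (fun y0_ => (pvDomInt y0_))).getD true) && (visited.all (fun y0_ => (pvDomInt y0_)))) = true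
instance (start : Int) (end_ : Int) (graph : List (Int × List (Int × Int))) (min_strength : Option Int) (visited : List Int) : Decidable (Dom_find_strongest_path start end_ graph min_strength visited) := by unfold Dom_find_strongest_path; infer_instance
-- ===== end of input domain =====

-- B replaces A's recursive DFS over all simple paths by a different algorithm: a BFS to the
-- reachable subgraph followed by a Bellman-Ford-style value iteration on max-bottleneck-to-end
-- values (A's in-place visited.add/remove has no net effect on the caller's set, so return-value
-- equivalence is the whole behaviour).


-- ===== PORT A =====
-- Measure lemma cited by the port's decreasing_by: adding an unvisited graph key to `visited`
-- strictly shrinks the number of unvisited graph keys.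
theorem pv_contains_false_iff (s : PySem.Set Int) (x : Int) :
    PySem.Set.contains s x = false ↔ x ∉ s := by
  rw [Bool.eq_false_iff, Ne, PySem.Set.contains_iff]

theorem pv_filter_le {p q : Int → Bool} (himp : ∀ k, q k = true → p k = true) :
    ∀ (m : List Int), (m.filter q).length ≤ (m.filter p).length := by
  intro m
  induction m with
  | nil => simp
  | cons a t ih =>
    by_cases hqa : q a = true
    · simp only [List.filter_cons, hqa, himp a hqa, if_true, List.length_cons]; omega
    · simp only [List.filter_cons, hqa, if_false]
      cases hpa : p a <;> simp <;> omega

theorem pv_filter_lt {p q : Int → Bool} (himp : ∀ k, q k = true → p k = true) :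
    ∀ (l : List Int) (x : Int), x ∈ l → p x = true → q x = false →
      (l.filter q).length < (l.filter p).length := by
  have hle : ∀ (m : List Int), (m.filter q).length ≤ (m.filter p).length := pv_filter_le himp
  intro l
  induction l with
  | nil => intro x h; cases h
  | cons a t ih =>
    intro x hx hp hq
    rcases List.mem_cons.1 hx with rfl | hxt
    · have hq' : ¬ (q x = true) := by simp [hq]
      simp only [List.filter_cons, hp, hq', if_true, if_false, List.length_cons]
      exact Nat.lt_succ_of_le (hle t)
    · by_cases hqa : q a = true
      · simp only [List.filter_cons, hqa, himp a hqa, if_true, List.length_cons]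
        exact Nat.succ_lt_succ (ih x hxt hp hq)
      · have hqa' : ¬ (q a = true) := hqa
        simp only [List.filter_cons, hqa', if_false]
        cases hpa : p a
        · simp only [Bool.false_eq_true, if_false]
          exact ih x hxt hp hq
        · simp only [if_true, List.length_cons]
          exact Nat.lt_succ_of_lt (ih x hxt hp hq)

theorem pv_measure_lt (gk vis : List Int) (x : Int) (hk : x ∈ gk)
    (hv : PySem.Set.contains vis x = false) :
    (gk.filter (fun k => !(PySem.Set.contains (PySem.Set.add vis x) k))).length <
      (gk.filter (fun k => !(PySem.Set.contains vis k))).length := by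
  have hxv : x ∉ vis := (pv_contains_false_iff vis x).1 hv
  apply pv_filter_lt (p := fun k => !(PySem.Set.contains vis k))
    (q := fun k => !(PySem.Set.contains (PySem.Set.add vis x) k))
  · intro k hqk
    simp only [Bool.not_eq_eq_eq_not, Bool.not_true] at hqk ⊢
    rw [pv_contains_false_iff] at hqk ⊢
    intro hkv
    exact hqk ((PySem.Set.mem_add vis x k).2 (Or.inl hkv))
  · exact hk
  · simp only [Bool.not_eq_eq_eq_not, Bool.not_true]
    rw [pv_contains_false_iff]; exact hxv
  · simp only [Bool.not_eq_eq_eq_not, Bool.not_false]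
    rw [PySem.Set.contains_iff]
    exact (PySem.Set.mem_add vis x x).2 (Or.inr rfl)

mutual
/-- Port of A: recursive DFS over simple paths.  Python returns `min_strength` (possibly None)
when `start == end`; the None case is outside `Pre_` and rendered `.getD 0`.  The dead
`max_edge_strength = max(graph[start].values())` raises ValueError on an empty adjacency dict;
the inputs where A's DFS enters such a node are outside `Pre_`, so the port omits the dead
computation. -/
def findA (g : PySem.Dict Int (PySem.Dict Int Int)) (end_ : Int) (start : Int)
    (min_strength : Option Int) (visited : PySem.Set Int) : Int :=
  if start = end_ then min_strength.getD 0
  else if h2 : !(g.contains start) || PySem.Set.contains visited start then 0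
  else
    let visited' := PySem.Set.add visited start
    let adj := (g.get? start).getD PySem.Dict.empty
    let all_strengths := loopA g end_ min_strength visited' adj adj.keys []
    match all_strengths.max? with
    | some m => m
    | none => 0
termination_by ((g.keys.filter (fun k => !(PySem.Set.contains visited k))).length, 0)
decreasing_by
  apply Prod.Lex.left
  apply pv_measure_lt
  · rw [← PySem.Dict.contains_iff_mem_keys]
    revert h2; cases g.contains start <;> simp
  · revert h2; cases PySem.Set.contains visited start <;> simp

/-- Port of A's `for n in graph[start]:` loop accumulating `all_strengths`. -/
def loopA (g : PySem.Dict Int (PySem.Dict Int Int)) (end_ : Int) (min_strength : Option Int)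
    (visited' : PySem.Set Int) (adj : PySem.Dict Int Int) (ks : List Int) (acc : List Int) :
    List Int :=
  match ks with
  | [] => acc
  | n :: rest =>
    let strength := adj.getD n 0
    if !(PySem.Set.contains visited' n) then
      let new_strength := match min_strength with | some m => min m strength | none => strength
      let ps := findA g end_ n (some new_strength) visited'
      loopA g end_ min_strength visited' adj rest (if ps > 0 then acc ++ [ps] else acc)
    else
      loopA g end_ min_strength visited' adj rest acc
termination_by ((g.keys.filter (fun k => !(PySem.Set.contains visited' k))).length, ks.length)
decreasing_by
  · apply Prod.Lex.right'
    · omega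
    · simp
  · apply Prod.Lex.right'
    · omega
    · simp
  · apply Prod.Lex.right'
    · omega
    · simp
end

def find_strongest_path (start : Int) (end_ : Int) (graph : List (Int × List (Int × Int)))
    (min_strength : Option Int) (visited : List Int) : Int :=
  findA (PySem.Dict.ofList (graph.map (fun p => (p.1, PySem.Dict.ofList p.2)))) end_ start
    min_strength (PySem.Set.ofList visited)

-- ===== PORT B =====
-- Termination lemma for the BFS loop, cited by its decreasing_by: the per-node fold either
-- adds nothing (and keeps `seen`) or puts some previously unseen graph key into `seen`.
theorem bfs_fold_dec (g : PySem.Dict Int (PySem.Dict Int Int)) (end_ : Int)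
    (vis : PySem.Set Int) :
    ∀ (ks : List Int) (seen : PySem.Set Int) (acc : List Int),
      (∀ x, x ∈ seen → x ∈ (ks.foldl
          (fun (sa : PySem.Set Int × List Int) v =>
            if g.contains v && !(decide (v = end_)) && !(PySem.Set.contains vis v)
                && !(PySem.Set.contains sa.1 v)
            then (PySem.Set.add sa.1 v, sa.2 ++ [v])
            else sa) (seen, acc)).1) ∧
      ((ks.foldl
          (fun (sa : PySem.Set Int × List Int) v =>
            if g.contains v && !(decide (v = end_)) && !(PySem.Set.contains vis v)
                && !(PySem.Set.contains sa.1 v)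
            then (PySem.Set.add sa.1 v, sa.2 ++ [v])
            else sa) (seen, acc)).2 = acc ∨
        ∃ v, v ∈ g.keys ∧ v ∉ seen ∧ v ∈ (ks.foldl
          (fun (sa : PySem.Set Int × List Int) v =>
            if g.contains v && !(decide (v = end_)) && !(PySem.Set.contains vis v)
                && !(PySem.Set.contains sa.1 v)
            then (PySem.Set.add sa.1 v, sa.2 ++ [v])
            else sa) (seen, acc)).1) := by
  intro ks
  induction ks with
  | nil => intro seen acc; exact ⟨fun x hx => hx, Or.inl rfl⟩
  | cons v ks ih =>
    intro seen acc
    simp only [List.foldl_cons]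
    by_cases hc : (g.contains v && !(decide (v = end_)) && !(PySem.Set.contains vis v)
        && !(PySem.Set.contains seen v)) = true
    · rw [if_pos hc]
      have hck : g.contains v = true := by
        simp only [Bool.and_eq_true] at hc
        exact hc.1.1.1
      have hcs : PySem.Set.contains seen v = false := by
        simp only [Bool.and_eq_true, Bool.not_eq_eq_eq_not, Bool.not_true] at hc
        exact hc.2
      have hvkeys : v ∈ g.keys := (PySem.Dict.contains_iff_mem_keys g v).1 hck
      have hvseen : v ∉ seen := (pv_contains_false_iff seen v).1 hcs
      refine ⟨?_, Or.inr ⟨v, hvkeys, hvseen, ?_⟩⟩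
      · intro x hx
        exact (ih (PySem.Set.add seen v) (acc ++ [v])).1 x
          ((PySem.Set.mem_add seen v x).2 (Or.inl hx))
      · exact (ih (PySem.Set.add seen v) (acc ++ [v])).1 v
          ((PySem.Set.mem_add seen v v).2 (Or.inr rfl))
    · rw [if_neg hc]
      exact ih seen acc

/-- Port of B's BFS (`while i < len(reach)` worklist): graph nodes reachable from `start`
avoiding `visited` and `end`. -/
def bfsB (g : PySem.Dict Int (PySem.Dict Int Int)) (end_ : Int) (vis : PySem.Set Int) :
    List Int → PySem.Set Int → List Int → List Int
  | [], _seen, reach => reach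
  | u :: queue, seen, reach =>
    let sa := ((g.get? u).getD PySem.Dict.empty).keys.foldl
      (fun (sa : PySem.Set Int × List Int) v =>
        if g.contains v && !(decide (v = end_)) && !(PySem.Set.contains vis v)
            && !(PySem.Set.contains sa.1 v)
        then (PySem.Set.add sa.1 v, sa.2 ++ [v])
        else sa) (seen, [])
    bfsB g end_ vis (queue ++ sa.2) sa.1 (reach ++ sa.2)
termination_by queue seen _reach =>
  ((g.keys.filter (fun k => !(PySem.Set.contains seen k))).length, queue.length)
decreasing_by
  simp only [dite_eq_ite]
  rcases bfs_fold_dec g end_ vis ((g.get? u).getD PySem.Dict.empty).keys seen []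
    with ⟨hsub, hcase⟩
  have himp : ∀ k : Int, (!(PySem.Set.contains
      ((((g.get? u).getD PySem.Dict.empty).keys.foldl
        (fun (sa : PySem.Set Int × List Int) v =>
          if g.contains v && !(decide (v = end_)) && !(PySem.Set.contains vis v)
              && !(PySem.Set.contains sa.1 v)
          then (PySem.Set.add sa.1 v, sa.2 ++ [v])
          else sa) (seen, [])).1) k)) = true →
      (!(PySem.Set.contains seen k)) = true := by
    intro k hk
    by_cases hks : k ∈ seen
    · exfalso
      rw [(PySem.Set.contains_iff _ k).2 (hsub k hks)] at hk
      cases hk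
    · rw [(pv_contains_false_iff seen k).2 hks]
      rfl
  rcases hcase with h2 | ⟨v, hvk, hvs, hvs'⟩
  · rcases Nat.lt_or_eq_of_le (pv_filter_le himp g.keys) with hlt | heq
    · exact Prod.Lex.left _ _ hlt
    · apply Prod.Lex.right'
      · omega
      · rw [h2]; simp
  · apply Prod.Lex.left
    apply pv_filter_lt himp _ v hvk
    · rw [(pv_contains_false_iff seen v).2 hvs]
      rfl
    · rw [(PySem.Set.contains_iff _ v).2 hvs']
      rfl

/-- Port of B's inner `for v, w in graph[u].items():` loop: best candidate bottleneck at `u`. -/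
def bestB (end_ : Int) (vis : PySem.Set Int) (b : PySem.Dict Int Int)
    (items : List (Int × Int)) : Option Int :=
  items.foldl
    (fun best vw =>
      if PySem.Set.contains vis vw.1 then best
      else
        match (if vw.1 = end_ then some vw.2
               else match b.get? vw.1 with
                    | some bv => some (min vw.2 bv)
                    | none => none) with
        | none => best
        | some c => match best with
                    | none => some c
                    | some be => if c > be then some c else some be)
    none

/-- Port of B's `for u in reach:` round building the new table `nb`. -/
def stepB (g : PySem.Dict Int (PySem.Dict Int Int)) (end_ : Int) (vis : PySem.Set Int)
    (reach : List Int) (b : PySem.Dict Int Int) : PySem.Dict Int Int :=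
  reach.foldl
    (fun nb u =>
      match bestB end_ vis b ((g.get? u).getD PySem.Dict.empty).items with
      | none => nb
      | some m => nb.insert u m)
    PySem.Dict.empty

/-- Port of B: BFS to the reachable subgraph, then Bellman–Ford-style value iteration
(len(reach) rounds). -/
def find_strongest_path_alt (start : Int) (end_ : Int) (graph : List (Int × List (Int × Int)))
    (min_strength : Option Int) (visited : List Int) : Int :=
  let g := PySem.Dict.ofList (graph.map (fun p => (p.1, PySem.Dict.ofList p.2)))
  let vis := PySem.Set.ofList visited
  if start = end_ then min_strength.getD 0
  else if !(g.contains start) || PySem.Set.contains vis start then 0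
  else
    let reach := bfsB g end_ vis [start] (PySem.Set.ofList [start]) [start]
    let bK := (List.range reach.length).foldl (fun b _ => stepB g end_ vis reach b)
      PySem.Dict.empty
    match bK.get? start with
    | none => 0
    | some bs =>
      let v := match min_strength with | some m => min m bs | none => bs
      if v > 0 then v else 0

-- ===== PRECONDITION & SPEC =====
-- The input graph as the dict both ports use (a property of the input, shared by Pre_).
def pvG (graph : List (Int × List (Int × Int))) : PySem.Dict Int (PySem.Dict Int Int) :=
  PySem.Dict.ofList (graph.map (fun p => (p.1, PySem.Dict.ofList p.2)))

-- Graph reachability of the INPUT (a |keys|-round transitive-closure fold over the input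
-- graph's edges, not either port's recursion): nodes with a path from `start` through graph
-- keys avoiding `visited` and `end_`.
def pvReach (graph : List (Int × List (Int × Int))) (end_ : Int) (visited : List Int)
    (start : Int) : List Int :=
  (List.range (pvG graph).keys.length).foldl
    (fun cur _ => cur ++
      ((cur.flatMap (fun u => (((pvG graph).get? u).getD PySem.Dict.empty).keys)).filter
        (fun v => (pvG graph).contains v && !(decide (v ∈ visited)) && !(decide (v = end_))
          && !(cur.contains v))))
    [start]

-- Pre_ excludes exactly the inputs on which A does not return an int: (i) min_strength = None
-- together with start == end, where A returns None (not an int), and (ii) inputs whose graph has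
-- a node with an EMPTY adjacency dict reachable from start avoiding visited and end — there A's
-- DFS enters that node and raises ValueError (max() of an empty sequence); graphs whose empty
-- nodes are all unreachable stay inside Pre_ and are matched.
def Pre_find_strongest_path (start : Int) (end_ : Int) (graph : List (Int × List (Int × Int)))
    (min_strength : Option Int) (visited : List Int) : Prop :=
  (min_strength = none → start ≠ end_) ∧
  ((start ≠ end_ ∧ (pvG graph).contains start = true ∧ start ∉ visited) →
    ∀ n ∈ pvReach graph end_ visited start,
      (((pvG graph).get? n).getD PySem.Dict.empty).keys ≠ [])
instance (start : Int) (end_ : Int) (graph : List (Int × List (Int × Int))) (min_strength : Option Int) (visited : List Int) : Decidable (Pre_find_strongest_path start end_ graph min_strength visited) := by unfold Pre_find_strongest_path; infer_instance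

def pvWitness_find_strongest_path : Int × Int × (List (Int × List (Int × Int))) × Option Int × List Int :=
  (1, 3, [(1, [(2, 5), (3, 1)]), (2, [(3, 4)])], none, [])

def Spec_find_strongest_path (start : Int) (end_ : Int) (graph : List (Int × List (Int × Int))) (min_strength : Option Int) (visited : List Int) (out : Int) : Prop := out = find_strongest_path_alt start end_ graph min_strength visited
instance (start : Int) (end_ : Int) (graph : List (Int × List (Int × Int))) (min_strength : Option Int) (visited : List Int) (out : Int) : Decidable (Spec_find_strongest_path start end_ graph min_strength visited out) := by unfold Spec_find_strongest_path; infer_instance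

-- ===== CLAIM (what is proved, stated in full; the proofs are below) =====
def Claim_equal_find_strongest_path : Prop := ∀ (start : Int) (end_ : Int) (graph : List (Int × List (Int × Int))) (min_strength : Option Int) (visited : List Int), Dom_find_strongest_path start end_ graph min_strength visited → Pre_find_strongest_path start end_ graph min_strength visited → Spec_find_strongest_path start end_ graph min_strength visited (find_strongest_path start end_ graph min_strength visited)

-- ===== LEMMAS AND PROOFS =====

/-- Adjacency item list of node `u` (empty when `u` is not a key). -/
def itemsOf (g : PySem.Dict Int (PySem.Dict Int Int)) (u : Int) : List (Int × Int) :=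
  ((g.get? u).getD PySem.Dict.empty).items

/-- Bottleneck (minimum weight) of a nonempty path given as (node, weight) steps. -/
def ibot : List (Int × Int) → Int
  | [] => 0
  | [q] => q.2
  | q :: rest => min q.2 (ibot rest)

/-- Cap a bottleneck by the optional accumulated `min_strength`. -/
def capv (ms : Option Int) (x : Int) : Int :=
  match ms with | some m => min m x | none => x

def capb (ms : Option Int) (p : List (Int × Int)) : Int := capv ms (ibot p)

/-- Intermediate nodes of a path (all step targets except the final `end_`). -/
def inter (p : List (Int × Int)) : List Int := p.dropLast.map Prod.fst

/-- Walks from `u` to `end_`: each step is a graph edge, every visited target avoids `vis0`,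
intermediate targets may repeat.  This is what B's value iteration explores. -/
inductive NW (g : PySem.Dict Int (PySem.Dict Int Int)) (end_ : Int) (vis0 : List Int) :
    Int → List (Int × Int) → Prop
  | single {u w} : u ≠ end_ → u ∉ vis0 → end_ ∉ vis0 → (end_, w) ∈ itemsOf g u →
      NW g end_ vis0 u [(end_, w)]
  | cons {u v w p} : u ≠ end_ → u ∉ vis0 → (v, w) ∈ itemsOf g u → v ∉ vis0 →
      NW g end_ vis0 v p → NW g end_ vis0 u ((v, w) :: p)

/-- Simple paths from `u` to `end_` avoiding the growing visited set `vis`, mirroring A's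
recursion (A extends `visited` by `u` before recursing). -/
inductive Chain (g : PySem.Dict Int (PySem.Dict Int Int)) (end_ : Int) :
    List Int → Int → List (Int × Int) → Prop
  | single {vis u w} : u ≠ end_ → u ∉ vis → end_ ∉ vis → (end_, w) ∈ itemsOf g u →
      Chain g end_ vis u [(end_, w)]
  | cons {vis u v w p} : u ≠ end_ → u ∉ vis → (v, w) ∈ itemsOf g u → v ∉ vis → v ≠ u →
      Chain g end_ (vis ++ [u]) v p → Chain g end_ vis u ((v, w) :: p)

/-- All adjacency dicts reachable from `g` have Nodup keys. -/
def InnerNodup (g : PySem.Dict Int (PySem.Dict Int Int)) : Prop :=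
  ∀ u, ((g.get? u).getD PySem.Dict.empty).keys.Nodup

/-- The loop value A computes for neighbour `n` of the current node. -/
def psA (g : PySem.Dict Int (PySem.Dict Int Int)) (end_ : Int) (ms : Option Int)
    (vis' : PySem.Set Int) (adj : PySem.Dict Int Int) (n : Int) : Int :=
  findA g end_ n (some (match ms with | some m => min m (adj.getD n 0) | none => adj.getD n 0)) vis'

def candsOf (end_ : Int) (vis : PySem.Set Int) (b : PySem.Dict Int Int)
    (items : List (Int × Int)) : List Int :=
  items.filterMap (fun vw =>
    if PySem.Set.contains vis vw.1 then none
    else if vw.1 = end_ then some vw.2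
    else match b.get? vw.1 with
         | some bv => some (min vw.2 bv)
         | none => none)

def optMax (l : List Int) (acc : Option Int) : Option Int :=
  l.foldl (fun a c => match a with
                      | none => some c
                      | some be => if c > be then some c else some be) acc

def iterB (g : PySem.Dict Int (PySem.Dict Int Int)) (end_ : Int) (vis : PySem.Set Int)
    (reach : List Int) : Nat → PySem.Dict Int Int :=
  fun k => (stepB g end_ vis reach)^[k] PySem.Dict.empty

/-- The closure property of the BFS result that the value iteration relies on. -/
def ReachClosed (g : PySem.Dict Int (PySem.Dict Int Int)) (end_ : Int) (vis0 : List Int)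
    (reach : List Int) : Prop :=
  ∀ u ∈ reach, ∀ v w, (v, w) ∈ itemsOf g u → v ∈ g.keys → v ∉ vis0 → v ≠ end_ → v ∈ reach

-- ----- small facts -----

theorem ibot_cons (q : Int × Int) (p : List (Int × Int)) (hp : p ≠ []) :
    ibot (q :: p) = min q.2 (ibot p) := by
  cases p with
  | nil => exact absurd rfl hp
  | cons r rs => rfl

theorem inter_cons (q : Int × Int) (p : List (Int × Int)) (hp : p ≠ []) :
    inter (q :: p) = q.1 :: inter p := by
  cases p with
  | nil => exact absurd rfl hp
  | cons r rs => simp [inter]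

theorem ibot_le_of_mem : ∀ {p : List (Int × Int)} {x : Int × Int}, x ∈ p → ibot p ≤ x.2 := by
  intro p
  induction p with
  | nil => intro x h; cases h
  | cons a t ih =>
    intro x hx
    cases t with
    | nil =>
      rcases List.mem_cons.1 hx with rfl | h
      · exact le_refl _
      · cases h
    | cons b u =>
      rw [ibot_cons a (b :: u) (by simp)]
      rcases List.mem_cons.1 hx with rfl | h
      · exact min_le_left _ _
      · exact le_trans (min_le_right _ _) (ih h)

theorem ibot_mem : ∀ {p : List (Int × Int)}, p ≠ [] → ∃ x ∈ p, ibot p = x.2 := by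
  intro p
  induction p with
  | nil => intro h; exact absurd rfl h
  | cons a t ih =>
    intro _
    cases t with
    | nil => exact ⟨a, List.mem_cons_self, rfl⟩
    | cons b u =>
      obtain ⟨x, hx, hev⟩ := ih (by simp)
      rw [ibot_cons a (b :: u) (by simp)]
      rcases le_total a.2 (ibot (b :: u)) with hle | hle
      · exact ⟨a, List.mem_cons_self, min_eq_left hle⟩
      · exact ⟨x, List.mem_cons_of_mem _ hx, by rw [min_eq_right hle, hev]⟩

theorem ibot_subset_le {p q : List (Int × Int)} (hq : q ≠ []) (hsub : ∀ x ∈ q, x ∈ p) :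
    ibot p ≤ ibot q := by
  obtain ⟨x, hx, hev⟩ := ibot_mem hq
  rw [hev]
  exact ibot_le_of_mem (hsub x hx)

theorem capv_mono (ms : Option Int) {a b : Int} (h : a ≤ b) : capv ms a ≤ capv ms b := by
  cases ms <;> simp [capv] <;> omega

theorem capb_cons (ms : Option Int) (v w : Int) (p : List (Int × Int)) (hp : p ≠ []) :
    capb ms ((v, w) :: p) = capb (some (capv ms w)) p := by
  cases ms <;> simp only [capb, capv, ibot_cons _ _ hp] <;> omega

theorem mem_keys_of_itemsOf {g : PySem.Dict Int (PySem.Dict Int Int)} {u : Int}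
    {vw : Int × Int} (h : vw ∈ itemsOf g u) : u ∈ g.keys ∧ g.contains u = true := by
  unfold itemsOf at h
  cases hgu : g.get? u with
  | none => rw [hgu] at h; cases h
  | some adj =>
    have hc : g.contains u = true := by
      rw [PySem.Dict.contains_eq_isSome_get?, hgu]; rfl
    exact ⟨(PySem.Dict.contains_iff_mem_keys g u).1 hc, hc⟩

theorem chain_ne_nil {g end_ vis u p} (h : Chain g end_ vis u p) : p ≠ [] := by
  cases h <;> simp

theorem nw_ne_nil {g end_ vis0 u p} (h : NW g end_ vis0 u p) : p ≠ [] := by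
  cases h <;> simp

theorem chain_head_keys {g end_ vis u p} (h : Chain g end_ vis u p) :
    u ∈ g.keys ∧ u ≠ end_ ∧ u ∉ vis := by
  cases h with
  | single hne hun _ hitem => exact ⟨(mem_keys_of_itemsOf hitem).1, hne, hun⟩
  | cons hne hun hitem _ _ _ => exact ⟨(mem_keys_of_itemsOf hitem).1, hne, hun⟩

theorem nw_head_ne {g end_ vis0 u p} (h : NW g end_ vis0 u p) : u ≠ end_ ∧ u ∉ vis0 := by
  cases h <;> exact ⟨by assumption, by assumption⟩

theorem nw_end_not_vis {g end_ vis0 u p} (h : NW g end_ vis0 u p) : end_ ∉ vis0 := by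
  induction h with
  | single _ _ he _ => exact he
  | cons _ _ _ _ _ ih => exact ih

theorem nw_mem_keys {g end_ vis0 u p} (h : NW g end_ vis0 u p) : u ∈ g.keys := by
  cases h with
  | single _ _ _ hm => exact (mem_keys_of_itemsOf hm).1
  | cons _ _ hm _ _ => exact (mem_keys_of_itemsOf hm).1

theorem nw_inter_not_vis {g end_ vis0 u p} (h : NW g end_ vis0 u p) :
    ∀ x ∈ inter p, x ∉ vis0 := by
  induction h with
  | single _ _ _ _ => intro x hx; simp [inter] at hx
  | cons _ _ _ hv hrec ih =>
    intro x hx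
    rw [inter_cons _ _ (nw_ne_nil hrec)] at hx
    rcases List.mem_cons.1 hx with rfl | hx'
    · exact hv
    · exact ih x hx' 

-- ----- A-side characterisation -----

theorem findA_base (g : PySem.Dict Int (PySem.Dict Int Int)) (end_ : Int) (ms : Option Int)
    (vis : PySem.Set Int) : findA g end_ end_ ms vis = ms.getD 0 := by
  rw [findA]; simp

theorem guard_false_iff (g : PySem.Dict Int (PySem.Dict Int Int)) (u : Int)
    (vis : PySem.Set Int) :
    ((!(g.contains u) || PySem.Set.contains vis u) = false) ↔
      (g.contains u = true ∧ PySem.Set.contains vis u = false) := by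
  cases h1 : g.contains u <;> cases h2 : PySem.Set.contains vis u <;> simp

theorem findA_unfold (g : PySem.Dict Int (PySem.Dict Int Int)) (end_ u : Int) (ms : Option Int)
    (vis : PySem.Set Int) (h1 : u ≠ end_)
    (h2 : (!(g.contains u) || PySem.Set.contains vis u) = false) :
    findA g end_ u ms vis =
      (match (loopA g end_ ms (PySem.Set.add vis u) ((g.get? u).getD PySem.Dict.empty)
          ((g.get? u).getD PySem.Dict.empty).keys []).max? with
       | some m => m
       | none => 0) := by
  rw [findA, if_neg h1, dif_neg (by rw [h2]; exact Bool.false_ne_true)]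

theorem loopA_eq (g : PySem.Dict Int (PySem.Dict Int Int)) (end_ : Int) (ms : Option Int)
    (vis' : PySem.Set Int) (adj : PySem.Dict Int Int) :
    ∀ (ks : List Int) (acc : List Int),
      loopA g end_ ms vis' adj ks acc = acc ++ ks.filterMap (fun n =>
        if PySem.Set.contains vis' n = false ∧ 0 < psA g end_ ms vis' adj n
        then some (psA g end_ ms vis' adj n) else none) := by
  intro ks
  induction ks with
  | nil => intro acc; rw [loopA.eq_def]; simp
  | cons n rest ih =>
    intro acc
    rw [loopA.eq_def, List.filterMap_cons]
    by_cases hc : PySem.Set.contains vis' n = true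
    · simp only [hc, Bool.not_true, Bool.false_eq_true, if_false, ih]
      rw [if_neg (by simp [hc])]
    · have hc' : PySem.Set.contains vis' n = false := Bool.eq_false_iff.2 hc
      simp only [hc', Bool.not_false, if_true]
      by_cases hp : 0 < psA g end_ ms vis' adj n
      · rw [if_pos (show _ > (0:Int) by cases ms <;> exact hp), ih, if_pos ⟨trivial, hp⟩,
          List.append_assoc, List.singleton_append]
        cases ms <;> rfl
      · rw [if_neg (show ¬ (_ > (0:Int)) by cases ms <;> exact hp), ih, if_neg (by tauto)]

theorem mem_loopA (g : PySem.Dict Int (PySem.Dict Int Int)) (end_ : Int) (ms : Option Int)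
    (vis' : PySem.Set Int) (adj : PySem.Dict Int Int) (ks : List Int) (x : Int) :
      x ∈ loopA g end_ ms vis' adj ks [] ↔
        ∃ n ∈ ks, PySem.Set.contains vis' n = false ∧
          0 < psA g end_ ms vis' adj n ∧ x = psA g end_ ms vis' adj n := by
  rw [loopA_eq]
  simp only [List.nil_append, List.mem_filterMap]
  constructor
  · rintro ⟨n, hn, hf⟩
    by_cases h : PySem.Set.contains vis' n = false ∧ 0 < psA g end_ ms vis' adj n
    · rw [if_pos h] at hf
      exact ⟨n, hn, h.1, h.2, (Option.some_inj.1 hf).symm⟩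
    · rw [if_neg h] at hf; cases hf
  · rintro ⟨n, hn, h1, h2, rfl⟩
    exact ⟨n, hn, by rw [if_pos ⟨h1, h2⟩]⟩

theorem findA_sound (g : PySem.Dict Int (PySem.Dict Int Int)) (end_ : Int)
    (hg : InnerNodup g) :
    ∀ (N : Nat) (vis : PySem.Set Int) (u : Int) (ms : Option Int),
      (g.keys.filter (fun k => !(PySem.Set.contains vis k))).length ≤ N → u ≠ end_ →
      findA g end_ u ms vis = 0 ∨
        (0 < findA g end_ u ms vis ∧
          ∃ p, Chain g end_ vis u p ∧ findA g end_ u ms vis = capb ms p) := by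
  intro N
  induction N with
  | zero =>
    intro vis u ms hlen hne
    by_cases h2 : (!(g.contains u) || PySem.Set.contains vis u) = true
    · left; rw [findA, if_neg hne, dif_pos h2]
    · exfalso
      obtain ⟨hcu, hvu⟩ := (guard_false_iff g u vis).1 (Bool.eq_false_iff.2 h2)
      have hmem : u ∈ g.keys.filter (fun k => !(PySem.Set.contains vis k)) :=
        List.mem_filter.2 ⟨(PySem.Dict.contains_iff_mem_keys g u).1 hcu, by rw [hvu]; rfl⟩
      have hpos := List.length_pos_iff.2 (List.ne_nil_of_mem hmem)
      omega
  | succ N ih =>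
    intro vis u ms hlen hne
    by_cases h2 : (!(g.contains u) || PySem.Set.contains vis u) = true
    · left; rw [findA, if_neg hne, dif_pos h2]
    · have h2' := Bool.eq_false_iff.2 h2
      obtain ⟨hcu, hvu⟩ := (guard_false_iff g u vis).1 h2'
      have huv : u ∉ vis := (pv_contains_false_iff vis u).1 hvu
      have huk : u ∈ g.keys := (PySem.Dict.contains_iff_mem_keys g u).1 hcu
      rw [findA_unfold g end_ u ms vis hne h2']
      cases hmax : (loopA g end_ ms (PySem.Set.add vis u) ((g.get? u).getD PySem.Dict.empty)
          ((g.get? u).getD PySem.Dict.empty).keys []).max? with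
      | none => left; rfl
      | some m =>
        right
        simp only []
        have hmem := List.max?_mem hmax
        rw [mem_loopA] at hmem
        obtain ⟨n, hnks, hnv', hpos, hmp⟩ := hmem
        subst hmp
        have hnv'' : n ∉ PySem.Set.add vis u := (pv_contains_false_iff _ _).1 hnv'
        have hnvis : n ∉ vis := fun h => hnv'' ((PySem.Set.mem_add vis u n).2 (Or.inl h))
        have hnu : n ≠ u := fun h => hnv'' ((PySem.Set.mem_add vis u n).2 (Or.inr h))
        have hnd : ((g.get? u).getD PySem.Dict.empty).keys.Nodup := hg u
        have hitem : (n, ((g.get? u).getD PySem.Dict.empty).getD n 0) ∈ itemsOf g u := by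
          unfold itemsOf
          rw [PySem.Dict.items_eq_map_keys _ hnd 0]
          exact List.mem_map.2 ⟨n, hnks, rfl⟩
        by_cases hnend : n = end_
        · subst hnend
          refine ⟨hpos, [(n, ((g.get? u).getD PySem.Dict.empty).getD n 0)], ?_, ?_⟩
          · exact Chain.single hne huv hnvis hitem
          · show psA g n ms (PySem.Set.add vis u) ((g.get? u).getD PySem.Dict.empty) n = _
            unfold psA
            rw [findA_base]
            cases ms <;> rfl
        · have hpsa : psA g end_ ms (PySem.Set.add vis u) ((g.get? u).getD PySem.Dict.empty) n =
              findA g end_ n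
                (some (capv ms (((g.get? u).getD PySem.Dict.empty).getD n 0)))
                (PySem.Set.add vis u) := by
            cases ms <;> rfl
          have hlt : (g.keys.filter
              (fun k => !(PySem.Set.contains (PySem.Set.add vis u) k))).length ≤ N := by
            have := pv_measure_lt g.keys vis u huk hvu
            omega
          have hres := ih (PySem.Set.add vis u) n
            (some (capv ms (((g.get? u).getD PySem.Dict.empty).getD n 0))) hlt hnend
          rw [← hpsa] at hres
          rcases hres with h0 | ⟨_, p', hch', heq'⟩
          · omega
          · refine ⟨hpos, (n, ((g.get? u).getD PySem.Dict.empty).getD n 0) :: p', ?_, ?_⟩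
            · refine Chain.cons hne huv hitem hnvis hnu ?_
              rw [PySem.Set.add_of_not_mem huv] at hch'
              exact hch'
            · rw [heq', capb_cons ms n _ p' (chain_ne_nil hch')]

theorem findA_ge (g : PySem.Dict Int (PySem.Dict Int Int)) (end_ : Int) (hg : InnerNodup g) :
    ∀ (vis : PySem.Set Int) (u : Int) (p : List (Int × Int)) (ms : Option Int),
      Chain g end_ vis u p → 0 < capb ms p → capb ms p ≤ findA g end_ u ms vis := by
  intro vis u p ms hch
  induction hch generalizing ms with
  | @single vis u w hne hun hev hitem =>
    intro hpos
    obtain ⟨huk, hcu⟩ := mem_keys_of_itemsOf hitem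
    have hvu : PySem.Set.contains vis u = false := (pv_contains_false_iff _ _).2 hun
    have h2' : (!(g.contains u) || PySem.Set.contains vis u) = false :=
      (guard_false_iff g u vis).2 ⟨hcu, hvu⟩
    rw [findA_unfold g end_ u ms vis hne h2']
    have hnd : ((g.get? u).getD PySem.Dict.empty).keys.Nodup := hg u
    have hitem' : (end_, w) ∈ ((g.get? u).getD PySem.Dict.empty).items := hitem
    have hw : ((g.get? u).getD PySem.Dict.empty).getD end_ 0 = w :=
      PySem.Dict.getD_of_mem_items _ hitem' hnd 0
    have hkey : end_ ∈ ((g.get? u).getD PySem.Dict.empty).keys :=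
      PySem.Dict.mem_keys_of_mem_items _ hitem'
    have hpsval : psA g end_ ms (PySem.Set.add vis u) ((g.get? u).getD PySem.Dict.empty) end_ =
        capv ms w := by
      unfold psA
      rw [findA_base]
      cases ms <;> simp [capv, hw]
    have hcont' : PySem.Set.contains (PySem.Set.add vis u) end_ = false := by
      rw [pv_contains_false_iff]
      intro hmem
      rcases (PySem.Set.mem_add vis u end_).1 hmem with h | h
      · exact hev h
      · exact hne h.symm
    have hposv : 0 < psA g end_ ms (PySem.Set.add vis u) ((g.get? u).getD PySem.Dict.empty) end_ := by
      rw [hpsval]; exact hpos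
    have hmem : capv ms w ∈ loopA g end_ ms (PySem.Set.add vis u)
        ((g.get? u).getD PySem.Dict.empty) ((g.get? u).getD PySem.Dict.empty).keys [] :=
      (mem_loopA _ _ _ _ _ _ _).2 ⟨end_, hkey, hcont', hposv, hpsval.symm⟩
    cases hmax : (loopA g end_ ms (PySem.Set.add vis u) ((g.get? u).getD PySem.Dict.empty)
        ((g.get? u).getD PySem.Dict.empty).keys []).max? with
    | none =>
      rw [List.max?_eq_none_iff] at hmax
      rw [hmax] at hmem
      cases hmem
    | some m =>
      have hle := (List.max?_le_iff hmax).1 (le_refl m) (capv ms w) hmem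
      simp only []
      exact hle
  | @cons vis u v w p' hne hun hitem hvvis hvu hch ih =>
    intro hpos
    obtain ⟨huk, hcu⟩ := mem_keys_of_itemsOf hitem
    have hvu' : PySem.Set.contains vis u = false := (pv_contains_false_iff _ _).2 hun
    have h2' : (!(g.contains u) || PySem.Set.contains vis u) = false :=
      (guard_false_iff g u vis).2 ⟨hcu, hvu'⟩
    rw [findA_unfold g end_ u ms vis hne h2']
    have hnd : ((g.get? u).getD PySem.Dict.empty).keys.Nodup := hg u
    have hitem' : (v, w) ∈ ((g.get? u).getD PySem.Dict.empty).items := hitem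
    have hw : ((g.get? u).getD PySem.Dict.empty).getD v 0 = w :=
      PySem.Dict.getD_of_mem_items _ hitem' hnd 0
    have hkey : v ∈ ((g.get? u).getD PySem.Dict.empty).keys :=
      PySem.Dict.mem_keys_of_mem_items _ hitem'
    have hval := capb_cons ms v w p' (chain_ne_nil hch)
    have hpos' : 0 < capb (some (capv ms w)) p' := by rw [← hval]; exact hpos
    have hih := ih (some (capv ms w)) hpos'
    have hpsval : psA g end_ ms (PySem.Set.add vis u) ((g.get? u).getD PySem.Dict.empty) v =
        findA g end_ v (some (capv ms w)) (vis ++ [u]) := by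
      rw [← PySem.Set.add_of_not_mem hun]
      cases ms <;> simp [psA, capv, hw]
    have hvge : capb (some (capv ms w)) p' ≤
        psA g end_ ms (PySem.Set.add vis u) ((g.get? u).getD PySem.Dict.empty) v := by
      rw [hpsval]; exact hih
    have hposv : 0 < psA g end_ ms (PySem.Set.add vis u) ((g.get? u).getD PySem.Dict.empty) v := by
      omega
    have hcont' : PySem.Set.contains (PySem.Set.add vis u) v = false := by
      rw [pv_contains_false_iff]
      intro hmem
      rcases (PySem.Set.mem_add vis u v).1 hmem with h | h
      · exact hvvis h
      · exact hvu h
    have hmem : psA g end_ ms (PySem.Set.add vis u) ((g.get? u).getD PySem.Dict.empty) v ∈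
        loopA g end_ ms (PySem.Set.add vis u) ((g.get? u).getD PySem.Dict.empty)
          ((g.get? u).getD PySem.Dict.empty).keys [] :=
      (mem_loopA _ _ _ _ _ _ _).2 ⟨v, hkey, hcont', hposv, rfl⟩
    cases hmax : (loopA g end_ ms (PySem.Set.add vis u) ((g.get? u).getD PySem.Dict.empty)
        ((g.get? u).getD PySem.Dict.empty).keys []).max? with
    | none =>
      rw [List.max?_eq_none_iff] at hmax
      rw [hmax] at hmem
      cases hmem
    | some m =>
      have hle := (List.max?_le_iff hmax).1 (le_refl m) _ hmem
      simp only []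
      rw [hval]
      omega

theorem chain_lenR (g : PySem.Dict Int (PySem.Dict Int Int)) (end_ : Int) (vis0 : List Int)
    (reach : List Int) (hclo : ReachClosed g end_ vis0 reach) :
    ∀ (vis : List Int) (u : Int) (p : List (Int × Int)), Chain g end_ vis u p →
      u ∈ reach → (∀ x ∈ vis0, x ∈ vis) →
      p.length ≤ (reach.filter (fun k => !(PySem.Set.contains vis k))).length := by
  intro vis u p hch
  induction hch with
  | @single vis u w hne hun hev hitem =>
    intro hur _
    have hmem : u ∈ reach.filter (fun k => !(PySem.Set.contains vis k)) :=
      List.mem_filter.2 ⟨hur, by rw [(pv_contains_false_iff vis u).2 hun]; rfl⟩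
    have hpos := List.length_pos_iff.2 (List.ne_nil_of_mem hmem)
    simp only [List.length_cons, List.length_nil]
    omega
  | @cons vis u v w p' hne hun hitem hvvis hvu hch ih =>
    intro hur hsub
    have hvr : v ∈ reach := by
      obtain ⟨hvk, hvne, _⟩ := chain_head_keys hch
      exact hclo u hur v w hitem hvk (fun h => hvvis (hsub v h)) hvne
    have hsub' : ∀ x ∈ vis0, x ∈ vis ++ [u] :=
      fun x hx => List.mem_append.2 (Or.inl (hsub x hx))
    have hvu' := (pv_contains_false_iff vis u).2 hun
    have hlt := pv_measure_lt reach vis u hur hvu'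
    rw [PySem.Set.add_of_not_mem hun] at hlt
    have := ih hvr hsub'
    simp only [List.length_cons]
    omega

-- ----- B-side characterisation -----

theorem foldl_range_iterate {α : Type} (f : α → α) (init : α) (n : Nat) :
    (List.range n).foldl (fun b _ => f b) init = f^[n] init := by
  induction n with
  | zero => rfl
  | succ n ih =>
    rw [List.range_succ, List.foldl_append, ih, Function.iterate_succ_apply']
    rfl

theorem bestB_fold (end_ : Int) (vis : PySem.Set Int) (b : PySem.Dict Int Int) :
    ∀ (items : List (Int × Int)) (acc : Option Int),
      items.foldl
        (fun best vw =>
          if PySem.Set.contains vis vw.1 then best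
          else
            match (if vw.1 = end_ then some vw.2
                   else match b.get? vw.1 with
                        | some bv => some (min vw.2 bv)
                        | none => none) with
            | none => best
            | some c => match best with
                        | none => some c
                        | some be => if c > be then some c else some be) acc =
      optMax (candsOf end_ vis b items) acc := by
  intro items
  induction items with
  | nil => intro acc; rfl
  | cons vw rest ih =>
    intro acc
    rw [List.foldl_cons]
    unfold candsOf
    rw [List.filterMap_cons]
    by_cases hcv : PySem.Set.contains vis vw.1 = true
    · rw [if_pos hcv, if_pos hcv]
      exact ih acc
    · have hcv' : ¬ (PySem.Set.contains vis vw.1 = true) := hcv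
      rw [if_neg hcv', if_neg hcv']
      cases hcand : (if vw.1 = end_ then some vw.2
                     else match b.get? vw.1 with
                          | some bv => some (min vw.2 bv)
                          | none => none) with
      | none => exact ih acc
      | some c =>
        rw [show optMax (c :: List.filterMap _ rest) acc = optMax (List.filterMap _ rest)
            (match acc with
             | none => some c
             | some be => if c > be then some c else some be) from rfl]
        exact ih _

theorem bestB_eq_optMax (end_ : Int) (vis : PySem.Set Int) (b : PySem.Dict Int Int)
    (items : List (Int × Int)) : bestB end_ vis b items = optMax (candsOf end_ vis b items) none :=
  bestB_fold end_ vis b items none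

theorem optMax_acc_le : ∀ (l : List Int) (a : Int),
    ∃ m, optMax l (some a) = some m ∧ a ≤ m := by
  intro l
  induction l with
  | nil => intro a; exact ⟨a, rfl, le_refl a⟩
  | cons c rest ih =>
    intro a
    show ∃ m, optMax rest (if c > a then some c else some a) = some m ∧ a ≤ m
    by_cases h : c > a
    · rw [if_pos h]
      obtain ⟨m, hm, hle⟩ := ih c
      exact ⟨m, hm, by omega⟩
    · rw [if_neg h]
      exact ih a

theorem optMax_isMax : ∀ (l : List Int) (acc : Option Int) (m : Int),
    optMax l acc = some m → ∀ c ∈ l, c ≤ m := by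
  intro l
  induction l with
  | nil => intro acc m _ c hc; cases hc
  | cons c0 rest ih =>
    intro acc m hm c hc
    cases acc with
    | none =>
      have hm' : optMax rest (some c0) = some m := hm
      rcases List.mem_cons.1 hc with rfl | hcr
      · obtain ⟨m', hm'', hle⟩ := optMax_acc_le rest c
        rw [hm'] at hm''
        have := Option.some_inj.1 hm''
        omega
      · exact ih (some c0) m hm' c hcr
    | some be =>
      have hm0 : optMax rest (if c0 > be then some c0 else some be) = some m := hm
      by_cases h : c0 > be
      · rw [if_pos h] at hm0
        rcases List.mem_cons.1 hc with rfl | hcr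
        · obtain ⟨m', hm'', hle⟩ := optMax_acc_le rest c
          rw [hm0] at hm''
          have := Option.some_inj.1 hm''
          omega
        · exact ih (some c0) m hm0 c hcr
      · rw [if_neg h] at hm0
        rcases List.mem_cons.1 hc with rfl | hcr
        · obtain ⟨m', hm'', hle⟩ := optMax_acc_le rest be
          rw [hm0] at hm''
          have := Option.some_inj.1 hm''
          omega
        · exact ih (some be) m hm0 c hcr

theorem optMax_mem_acc : ∀ (l : List Int) (a m : Int),
    optMax l (some a) = some m → m = a ∨ m ∈ l := by
  intro l
  induction l with
  | nil => intro a m hm; exact Or.inl (Option.some_inj.1 hm).symm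
  | cons c rest ih =>
    intro a m hm
    rw [show optMax (c :: rest) (some a) = optMax rest (if c > a then some c else some a)
        from rfl] at hm
    by_cases h : c > a
    · rw [if_pos h] at hm
      rcases ih c m hm with rfl | hmr
      · exact Or.inr List.mem_cons_self
      · exact Or.inr (List.mem_cons_of_mem _ hmr)
    · rw [if_neg h] at hm
      rcases ih a m hm with rfl | hmr
      · exact Or.inl rfl
      · exact Or.inr (List.mem_cons_of_mem _ hmr)

theorem optMax_mem : ∀ (l : List Int) (m : Int), optMax l none = some m → m ∈ l := by
  intro l m hm
  cases l with
  | nil => cases hm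
  | cons c rest =>
    rw [show optMax (c :: rest) none = optMax rest (some c) from rfl] at hm
    rcases optMax_mem_acc rest c m hm with rfl | hmr
    · exact List.mem_cons_self
    · exact List.mem_cons_of_mem _ hmr

theorem optMax_isSome : ∀ (l : List Int) (a : Int), ∃ m, optMax l (some a) = some m := by
  intro l a
  obtain ⟨m, hm, _⟩ := optMax_acc_le l a
  exact ⟨m, hm⟩

theorem optMax_ge : ∀ (l : List Int) (c : Int), c ∈ l → ∃ m, optMax l none = some m ∧ c ≤ m := by
  intro l c hc
  cases l with
  | nil => cases hc
  | cons c0 rest =>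
    obtain ⟨m, hm⟩ := optMax_isSome rest c0
    have hm' : optMax (c0 :: rest) none = some m := hm
    exact ⟨m, hm', optMax_isMax _ none m hm' c hc⟩

theorem mem_candsOf (end_ : Int) (vis : PySem.Set Int) (b : PySem.Dict Int Int)
    (items : List (Int × Int)) (c : Int) :
    c ∈ candsOf end_ vis b items ↔
      ∃ v w, (v, w) ∈ items ∧ PySem.Set.contains vis v = false ∧
        ((v = end_ ∧ c = w) ∨
          (v ≠ end_ ∧ ∃ bv, b.get? v = some bv ∧ c = min w bv)) := by
  unfold candsOf
  rw [List.mem_filterMap]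
  constructor
  · rintro ⟨⟨v, w⟩, hmem, hf⟩
    simp only at hf
    by_cases hcv : PySem.Set.contains vis v = true
    · rw [if_pos hcv] at hf; cases hf
    · rw [if_neg hcv] at hf
      refine ⟨v, w, hmem, Bool.eq_false_iff.2 hcv, ?_⟩
      by_cases hv : v = end_
      · rw [if_pos hv] at hf
        exact Or.inl ⟨hv, (Option.some_inj.1 hf).symm⟩
      · rw [if_neg hv] at hf
        cases hbv : b.get? v with
        | none => rw [hbv] at hf; cases hf
        | some bv =>
          rw [hbv] at hf
          exact Or.inr ⟨hv, bv, rfl, (Option.some_inj.1 hf).symm⟩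
  · rintro ⟨v, w, hmem, hcv, hcase⟩
    refine ⟨(v, w), hmem, ?_⟩
    simp only
    rw [if_neg (by rw [hcv]; exact Bool.false_ne_true)]
    rcases hcase with ⟨rfl, rfl⟩ | ⟨hv, bv, hbv, rfl⟩
    · rw [if_pos rfl]
    · rw [if_neg hv, hbv]

theorem foldl_condInsert_get?_not_mem (h : Int → Option Int) :
    ∀ (ks : List Int) (d : PySem.Dict Int Int) (u : Int), u ∉ ks →
      (ks.foldl (fun nb k => match h k with | none => nb | some m => nb.insert k m) d).get? u =
        d.get? u := by
  intro ks
  induction ks with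
  | nil => intro d u _; rfl
  | cons k rest ih =>
    intro d u hu
    have hne : u ≠ k := fun he => hu (he ▸ List.mem_cons_self)
    have hr : u ∉ rest := fun hm => hu (List.mem_cons_of_mem _ hm)
    rw [List.foldl_cons, ih _ u hr]
    cases hk : h k with
    | none => rfl
    | some m => exact PySem.Dict.get?_insert_of_ne d m hne

theorem foldl_condInsert_get?_mem (h : Int → Option Int) :
    ∀ (ks : List Int) (d : PySem.Dict Int Int) (u : Int), u ∈ ks →
      (ks.foldl (fun nb k => match h k with | none => nb | some m => nb.insert k m) d).get? u =
        match h u with | none => d.get? u | some m => some m := by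
  intro ks
  induction ks with
  | nil => intro d u hu; cases hu
  | cons k rest ih =>
    intro d u hu
    rw [List.foldl_cons]
    by_cases hur : u ∈ rest
    · rw [ih _ u hur]
      cases hk : h k with
      | none => rfl
      | some m =>
        by_cases hne : u = k
        · subst hne
          rw [hk]
        · rw [PySem.Dict.get?_insert_of_ne d m hne]
    · have heq : u = k := by
        rcases List.mem_cons.1 hu with h' | h'
        · exact h'
        · exact absurd h' hur
      subst heq
      rw [foldl_condInsert_get?_not_mem h rest _ u hur]
      cases hk : h u with
      | none => rfl
      | some m => exact PySem.Dict.get?_insert_self d u m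

theorem stepB_get? (g : PySem.Dict Int (PySem.Dict Int Int)) (end_ : Int) (vis : PySem.Set Int)
    (reach : List Int) (b : PySem.Dict Int Int) (u : Int) :
    (stepB g end_ vis reach b).get? u =
      if u ∈ reach then bestB end_ vis b (itemsOf g u) else none := by
  unfold stepB
  by_cases hu : u ∈ reach
  · rw [foldl_condInsert_get?_mem
      (fun k => bestB end_ vis b ((g.get? k).getD PySem.Dict.empty).items) reach _ u hu,
      if_pos hu]
    rw [show ((g.get? u).getD PySem.Dict.empty).items = itemsOf g u from rfl]
    cases bestB end_ vis b (itemsOf g u) <;> rfl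
  · rw [foldl_condInsert_get?_not_mem
      (fun k => bestB end_ vis b ((g.get? k).getD PySem.Dict.empty).items) reach _ u hu,
      if_neg hu]
    rfl

theorem iterB_char (g : PySem.Dict Int (PySem.Dict Int Int)) (end_ : Int) (vis0 : PySem.Set Int)
    (reach : List Int) (hclo : ReachClosed g end_ vis0 reach) :
    ∀ (k : Nat) (u : Int),
      (∀ m, u ∉ vis0 → u ≠ end_ → (iterB g end_ vis0 reach k).get? u = some m →
        ∃ p, NW g end_ vis0 u p ∧ p.length ≤ k ∧ m = ibot p) ∧
      (∀ p, NW g end_ vis0 u p → u ∈ reach → p.length ≤ k →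
        ∃ m, (iterB g end_ vis0 reach k).get? u = some m ∧ ibot p ≤ m) := by
  intro k
  induction k with
  | zero =>
    intro u
    constructor
    · intro m _ _ hm
      rw [show iterB g end_ vis0 reach 0 = PySem.Dict.empty from rfl] at hm
      cases hm
    · intro p hnw _ hlen
      cases p with
      | nil => exact absurd rfl (nw_ne_nil hnw)
      | cons a t => simp at hlen
  | succ k ih =>
    intro u
    have hstep : iterB g end_ vis0 reach (k + 1) =
        stepB g end_ vis0 reach (iterB g end_ vis0 reach k) := by
      unfold iterB
      rw [Function.iterate_succ_apply']
    constructor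
    · intro m hunot hue hm
      rw [hstep, stepB_get? g end_ vis0 reach _ u] at hm
      by_cases hcond : u ∈ reach
      swap
      · rw [if_neg hcond] at hm; cases hm
      rw [if_pos hcond] at hm
      rw [bestB_eq_optMax] at hm
      have hmem := optMax_mem _ _ hm
      rw [mem_candsOf] at hmem
      obtain ⟨v, w, hvw, hcv, hcase⟩ := hmem
      have hvnot : v ∉ vis0 := (pv_contains_false_iff _ _).1 hcv
      rcases hcase with ⟨rfl, rfl⟩ | ⟨hvne, bv, hbv, rfl⟩
      · exact ⟨[(v, m)], NW.single hue hunot hvnot hvw, by simp, rfl⟩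
      · obtain ⟨p', hnw', hlen', rfl⟩ := (ih v).1 bv hvnot hvne hbv
        refine ⟨(v, w) :: p', NW.cons hue hunot hvw hvnot hnw', ?_, ?_⟩
        · simp only [List.length_cons]; omega
        · rw [ibot_cons _ _ (nw_ne_nil hnw')]
    · intro p hnw hur hlen
      have hu := nw_head_ne hnw
      rw [hstep, stepB_get? g end_ vis0 reach _ u, if_pos hur, bestB_eq_optMax]
      cases hnw with
      | @single uu w hne hun hev hitem =>
        have hcv : PySem.Set.contains vis0 end_ = false := (pv_contains_false_iff _ _).2 hev
        have hcand : w ∈ candsOf end_ vis0 (iterB g end_ vis0 reach k) (itemsOf g u) :=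
          (mem_candsOf _ _ _ _ _).2 ⟨end_, w, hitem, hcv, Or.inl ⟨rfl, rfl⟩⟩
        obtain ⟨m, hm, hle⟩ := optMax_ge _ _ hcand
        exact ⟨m, hm, hle⟩
      | @cons uu v w p' hne hun hitem hvnot hnw' =>
        have hvne := (nw_head_ne hnw').1
        have hvkeys := nw_mem_keys hnw'
        have hvr : v ∈ reach := hclo u hur v w hitem hvkeys hvnot hvne
        have hcv : PySem.Set.contains vis0 v = false :=
          (pv_contains_false_iff _ _).2 (nw_head_ne hnw').2
        obtain ⟨bv, hbv, hble⟩ := (ih v).2 p' hnw' hvr (by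
          simp only [List.length_cons] at hlen; omega)
        have hcand : min w bv ∈ candsOf end_ vis0 (iterB g end_ vis0 reach k) (itemsOf g u) :=
          (mem_candsOf _ _ _ _ _).2 ⟨v, w, hitem, hcv, Or.inr ⟨hvne, bv, hbv, rfl⟩⟩
        obtain ⟨m, hm, hle⟩ := optMax_ge _ _ hcand
        refine ⟨m, hm, ?_⟩
        rw [ibot_cons _ _ (nw_ne_nil hnw')]
        exact le_trans (min_le_min (le_refl w) hble) hle

-- ----- bridge between walks and simple paths -----

theorem chain_to_nw {g end_} : ∀ {vis vis0 : List Int} {u p}, Chain g end_ vis u p →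
    (∀ x ∈ vis0, x ∈ vis) → NW g end_ vis0 u p := by
  intro vis vis0 u p hch
  induction hch generalizing vis0 with
  | @single vis u w hne hun hev hitem =>
    intro hsub
    exact NW.single hne (fun h => hun (hsub u h)) (fun h => hev (hsub end_ h)) hitem
  | @cons vis u v w p' hne hun hitem hvvis hvu hch ih =>
    intro hsub
    refine NW.cons hne (fun h => hun (hsub u h)) hitem (fun h => hvvis (hsub v h)) ?_
    exact ih (fun x hx => List.mem_append.2 (Or.inl (hsub x hx)))

theorem nw_drop {g end_ vis0} : ∀ (j : Nat) {p : List (Int × Int)} {u},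
    NW g end_ vis0 u p → j + 1 < p.length →
    ∀ (hj : j < p.length), NW g end_ vis0 (p[j].1) (p.drop (j + 1)) := by
  intro j
  induction j with
  | zero =>
    intro p u hnw hlt hj
    cases hnw with
    | single => simp at hlt
    | @cons uu v w p' hne hun hitem hvnot hnw' => simpa using hnw'
  | succ j ih =>
    intro p u hnw hlt hj
    cases hnw with
    | single => simp at hlt
    | @cons uu v w p' hne hun hitem hvnot hnw' =>
      have hlt' : j + 1 < p'.length := by simp at hlt; omega
      have hj' : j < p'.length := by omega
      have := ih hnw' hlt' hj'
      simpa using this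

theorem inter_sub_cons (a : Int × Int) (p : List (Int × Int)) (x : Int) (hx : x ∈ inter p) :
    x ∈ inter (a :: p) := by
  cases p with
  | nil => simp [inter] at hx
  | cons b t =>
    rw [inter_cons a (b :: t) (by simp)]
    exact List.mem_cons_of_mem _ hx

theorem inter_drop_subset : ∀ (m : Nat) (p : List (Int × Int)) (x : Int),
    x ∈ inter (p.drop m) → x ∈ inter p := by
  intro m
  induction m with
  | zero => intro p x hx; simpa using hx
  | succ m ih =>
    intro p x hx
    cases p with
    | nil => simp [inter] at hx
    | cons a t =>
      rw [List.drop_succ_cons] at hx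
      exact inter_sub_cons a t x (ih t x hx)

theorem nw_simplify {g end_ vis0} : ∀ (n : Nat) (p : List (Int × Int)) (u : Int),
    p.length ≤ n → NW g end_ vis0 u p →
    ∃ q, NW g end_ vis0 u q ∧ (∀ x ∈ q, x ∈ p) ∧ (∀ x ∈ inter q, x ∈ inter p) ∧
      u ∉ inter q ∧ (inter q).Nodup := by
  intro n
  induction n with
  | zero =>
    intro p u hlen hnw
    cases p with
    | nil => exact absurd rfl (nw_ne_nil hnw)
    | cons a t => simp at hlen
  | succ n ih =>
    intro p u hlen hnw
    by_cases hu : u ∈ inter p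
    · -- u occurs as an intermediate node: restart from its last-entered suffix
      obtain ⟨pair, hpair, hfst⟩ := List.mem_map.1 hu
      obtain ⟨j, hj, hget⟩ := List.mem_iff_getElem.1 hpair
      have hjlt : j < p.length - 1 := by
        have := hj
        rw [List.length_dropLast] at this
        exact this
      have hplen : 0 < p.length := List.length_pos_iff.2 (nw_ne_nil hnw)
      have hj1 : j + 1 < p.length := by omega
      have hjp : j < p.length := by omega
      have hgu : p[j].1 = u := by
        rw [← List.getElem_dropLast hj, hget, hfst]
      have hdrop := nw_drop j hnw hj1 hjp
      rw [hgu] at hdrop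
      have hdlen : (p.drop (j + 1)).length ≤ n := by
        rw [List.length_drop]
        omega
      obtain ⟨q, hq1, hq2, hq3, hq4, hq5⟩ := ih (p.drop (j + 1)) u hdlen hdrop
      exact ⟨q, hq1, fun x hx => List.mem_of_mem_drop (hq2 x hx),
        fun x hx => inter_drop_subset (j + 1) p x (hq3 x hx), hq4, hq5⟩
    · cases hnw with
      | @single uu w hne hun hev hitem =>
        refine ⟨[(end_, w)], NW.single hne hun hev hitem, by simp, by simp, ?_, ?_⟩
        · simp [inter]
        · simp [inter]
      | @cons uu v w p' hne hun hitem hvnot hnw' =>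
        have hlen' : p'.length ≤ n := by
          simp only [List.length_cons] at hlen; omega
        obtain ⟨q', hq1, hq2, hq3, hq4, hq5⟩ := ih p' v hlen' hnw'
        have hip : inter ((v, w) :: p') = v :: inter p' := inter_cons _ _ (nw_ne_nil hnw')
        have hiq : inter ((v, w) :: q') = v :: inter q' := inter_cons _ _ (nw_ne_nil hq1)
        rw [hip] at hu
        have huv : u ≠ v := fun he => hu (he ▸ List.mem_cons_self)
        have huip' : u ∉ inter p' := fun hm => hu (List.mem_cons_of_mem _ hm)
        refine ⟨(v, w) :: q', NW.cons hne hun hitem hvnot hq1, ?_, ?_, ?_, ?_⟩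
        · intro x hx
          rcases List.mem_cons.1 hx with rfl | hxq
          · exact List.mem_cons_self
          · exact List.mem_cons_of_mem _ (hq2 x hxq)
        · intro x hx
          rw [hiq] at hx
          rw [hip]
          rcases List.mem_cons.1 hx with rfl | hxq
          · exact List.mem_cons_self
          · exact List.mem_cons_of_mem _ (hq3 x hxq)
        · rw [hiq]
          intro hmem
          rcases List.mem_cons.1 hmem with rfl | hxq
          · exact huv rfl
          · exact huip' (hq3 u hxq)
        · rw [hiq]
          exact List.nodup_cons.2 ⟨fun hm => hq4 (by exact hm), hq5⟩

theorem nw_to_chain {g end_ vis0} : ∀ {p u} (vis : List Int), NW g end_ vis0 u p →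
    (inter p).Nodup → u ∉ inter p → (∀ x ∈ inter p, x ∉ vis) → u ∉ vis → end_ ∉ vis →
    Chain g end_ vis u p := by
  intro p u vis hnw
  induction hnw generalizing vis with
  | @single uu w hne hun hev hitem =>
    intro _ _ _ huvis hevis
    exact Chain.single hne huvis hevis hitem
  | @cons uu v w p' hne hun hitem hvnot hnw' ih =>
    intro hnd hup hintv huvis hevis
    have hip : inter ((v, w) :: p') = v :: inter p' := inter_cons _ _ (nw_ne_nil hnw')
    rw [hip] at hnd hup hintv
    obtain ⟨hvni, hndp'⟩ := List.nodup_cons.1 hnd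
    have huv : uu ≠ v := fun he => hup (he ▸ List.mem_cons_self)
    have hup' : uu ∉ inter p' := fun hm => hup (List.mem_cons_of_mem _ hm)
    have hvvis : v ∉ vis := hintv v List.mem_cons_self
    refine Chain.cons hne huvis hitem hvvis (fun he => huv he.symm) ?_
    apply ih (vis ++ [uu]) hndp' hvni
    · intro x hx
      rw [List.mem_append]
      rintro (hxv | hxu)
      · exact hintv x (List.mem_cons_of_mem _ hx) hxv
      · rw [List.mem_singleton] at hxu
        exact hup' (hxu ▸ hx)
    · rw [List.mem_append]
      rintro (hv | hv)
      · exact hvvis hv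
      · rw [List.mem_singleton] at hv
        exact huv hv.symm
    · rw [List.mem_append]
      rintro (he | he)
      · exact hevis he
      · rw [List.mem_singleton] at he
        exact hne he.symm

-- ----- instantiation facts for the concrete graph -----

theorem values_update_subset {κ ν : Type} [BEq κ] [LawfulBEq κ] :
    ∀ (l : List (κ × ν)) (d : PySem.Dict κ ν) (x : ν),
      x ∈ (d.update l).values → x ∈ d.values ∨ x ∈ l.map Prod.snd := by
  intro l
  induction l with
  | nil => intro d x hx; exact Or.inl hx
  | cons a t ih =>
    intro d x hx
    have hx' : x ∈ ((d.insert a.1 a.2).update t).values := hx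
    rcases ih (d.insert a.1 a.2) x hx' with h | h
    · rcases PySem.Dict.mem_values_insert d a.1 a.2 x h with rfl | h'
      · exact Or.inr (List.mem_cons_self)
      · exact Or.inl h'
    · exact Or.inr (List.mem_cons_of_mem _ h)

theorem innerNodup_ofGraph (graph : List (Int × List (Int × Int))) :
    InnerNodup (PySem.Dict.ofList (graph.map (fun p => (p.1, PySem.Dict.ofList p.2)))) := by
  intro u
  cases hgu : (PySem.Dict.ofList (graph.map (fun p => (p.1, PySem.Dict.ofList p.2)))).get? u with
  | none =>
    exact List.nodup_nil
  | some d =>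
    show d.keys.Nodup
    have hmem := PySem.Dict.mem_items_of_get?_eq_some _ hgu
    have hval : d ∈ ((PySem.Dict.empty :
        PySem.Dict Int (PySem.Dict Int Int)).update
          (graph.map (fun p => (p.1, PySem.Dict.ofList p.2)))).values :=
      List.mem_map_of_mem (f := fun x : Int × PySem.Dict Int Int => x.2) hmem
    rcases values_update_subset _ PySem.Dict.empty d hval with h | h
    · cases h
    · obtain ⟨q, hq, rfl⟩ := List.mem_map.1 h
      obtain ⟨pp, _, rfl⟩ := List.mem_map.1 hq
      exact PySem.Dict.nodup_keys_ofList _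

-- ----- BFS characterisation -----

theorem bfs_fold_char (g : PySem.Dict Int (PySem.Dict Int Int)) (end_ : Int)
    (vis : PySem.Set Int) :
    ∀ (ks : List Int) (seen : PySem.Set Int) (acc : List Int),
      ∃ adds,
        (ks.foldl
          (fun (sa : PySem.Set Int × List Int) v =>
            if g.contains v && !(decide (v = end_)) && !(PySem.Set.contains vis v)
                && !(PySem.Set.contains sa.1 v)
            then (PySem.Set.add sa.1 v, sa.2 ++ [v])
            else sa) (seen, acc)).2 = acc ++ adds ∧
        (∀ x, x ∈ (ks.foldl
          (fun (sa : PySem.Set Int × List Int) v =>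
            if g.contains v && !(decide (v = end_)) && !(PySem.Set.contains vis v)
                && !(PySem.Set.contains sa.1 v)
            then (PySem.Set.add sa.1 v, sa.2 ++ [v])
            else sa) (seen, acc)).1 ↔ (x ∈ seen ∨ x ∈ adds)) ∧
        (∀ v ∈ ks, g.contains v = true → v ∉ vis → v ≠ end_ → v ∈ (ks.foldl
          (fun (sa : PySem.Set Int × List Int) v =>
            if g.contains v && !(decide (v = end_)) && !(PySem.Set.contains vis v)
                && !(PySem.Set.contains sa.1 v)
            then (PySem.Set.add sa.1 v, sa.2 ++ [v])
            else sa) (seen, acc)).1) := by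
  intro ks
  induction ks with
  | nil =>
    intro seen acc
    exact ⟨[], by simp, fun x => by simp, fun v hv => absurd hv (List.not_mem_nil)⟩
  | cons v ks ih =>
    intro seen acc
    simp only [List.foldl_cons]
    by_cases hc : (g.contains v && !(decide (v = end_)) && !(PySem.Set.contains vis v)
        && !(PySem.Set.contains seen v)) = true
    · rw [if_pos hc]
      obtain ⟨adds', h1, h2, h3⟩ := ih (PySem.Set.add seen v) (acc ++ [v])
      refine ⟨v :: adds', ?_, ?_, ?_⟩
      · rw [h1]; simp
      · intro x
        rw [h2 x, PySem.Set.mem_add]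
        simp only [List.mem_cons]
        tauto
      · intro v' hv' hck hvv hve
        rcases List.mem_cons.1 hv' with rfl | hv'ks
        · rw [h2 v']
          exact Or.inl ((PySem.Set.mem_add seen v' v').2 (Or.inr rfl))
        · exact h3 v' hv'ks hck hvv hve
    · rw [if_neg hc]
      obtain ⟨adds, h1, h2, h3⟩ := ih seen acc
      refine ⟨adds, h1, h2, ?_⟩
      intro v' hv' hck hvv hve
      rcases List.mem_cons.1 hv' with rfl | hv'ks
      · have hvseen : v' ∈ seen := by
          by_contra hns
          apply hc
          rw [hck, (pv_contains_false_iff vis v').2 hvv,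
            (pv_contains_false_iff seen v').2 hns, decide_eq_false hve]
          rfl
        exact (h2 v').2 (Or.inl hvseen)
      · exact h3 v' hv'ks hck hvv hve

theorem bfsB_spec (g : PySem.Dict Int (PySem.Dict Int Int)) (end_ : Int) (vis : PySem.Set Int) :
    ∀ (queue : List Int) (seen : PySem.Set Int) (reach : List Int),
      (∀ x, x ∈ seen ↔ x ∈ reach) →
      (∀ x ∈ queue, x ∈ reach) →
      (∀ u ∈ reach, u ∉ queue → ∀ v w, (v, w) ∈ itemsOf g u →
        v ∈ g.keys → v ∉ vis → v ≠ end_ → v ∈ seen) →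
      (∀ x ∈ reach, x ∈ bfsB g end_ vis queue seen reach) ∧
      ReachClosed g end_ vis (bfsB g end_ vis queue seen reach) := by
  intro queue seen reach
  induction queue, seen, reach using bfsB.induct g end_ vis with
  | case1 seen reach =>
    intro hiff hq hclo
    rw [show bfsB g end_ vis [] seen reach = reach from by rw [bfsB.eq_def]]
    refine ⟨fun x hx => hx, ?_⟩
    intro u hu v w hit hk hv hne
    exact (hiff v).1 (hclo u hu (List.not_mem_nil) v w hit hk hv hne)
  | case2 u queue seen reach sa ih =>
    intro hiff hq hclo
    rw [show bfsB g end_ vis (u :: queue) seen reach =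
        bfsB g end_ vis (queue ++ sa.2) sa.1 (reach ++ sa.2) from by rw [bfsB.eq_def]; rfl]
    obtain ⟨adds, h1, h2, h3⟩ :=
      bfs_fold_char g end_ vis ((g.get? u).getD PySem.Dict.empty).keys seen []
    have h1' : sa.2 = adds := by
      show (((g.get? u).getD PySem.Dict.empty).keys.foldl
          (fun (sa : PySem.Set Int × List Int) v =>
            if g.contains v && !(decide (v = end_)) && !(PySem.Set.contains vis v)
                && !(PySem.Set.contains sa.1 v)
            then (PySem.Set.add sa.1 v, sa.2 ++ [v])
            else sa) (seen, [])).2 = adds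
      rw [h1]
      simp
    have hstep := ih ?_ ?_ ?_
    · obtain ⟨ha, hb⟩ := hstep
      refine ⟨fun x hx => ha x (List.mem_append.2 (Or.inl hx)), hb⟩
    · -- seen' ↔ reach ++ adds
      intro x
      rw [h1']
      rw [show sa.1 = (((g.get? u).getD PySem.Dict.empty).keys.foldl
          (fun (sa : PySem.Set Int × List Int) v =>
            if g.contains v && !(decide (v = end_)) && !(PySem.Set.contains vis v)
                && !(PySem.Set.contains sa.1 v)
            then (PySem.Set.add sa.1 v, sa.2 ++ [v])
            else sa) (seen, [])).1 from rfl]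
      rw [h2 x, List.mem_append, hiff x]
    · -- queue ++ adds ⊆ reach ++ adds
      intro x hx
      rcases List.mem_append.1 hx with hx | hx
      · exact List.mem_append.2 (Or.inl (hq x (List.mem_cons_of_mem _ hx)))
      · exact List.mem_append.2 (Or.inr hx)
    · -- processed closure
      intro u' hu' hnq v w hit hk hv hne
      rw [h1'] at hu' hnq
      rcases List.mem_append.1 hu' with hu'r | hu'a
      swap
      · exact absurd (List.mem_append.2 (Or.inr hu'a)) hnq
      by_cases hueq : u' = u
      · subst hueq
        have hvks : v ∈ ((g.get? u').getD PySem.Dict.empty).keys :=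
          PySem.Dict.mem_keys_of_mem_items _ hit
        exact h3 v hvks ((PySem.Dict.contains_iff_mem_keys g v).2 hk) hv hne
      · have hnq' : u' ∉ queue := fun hm => hnq (List.mem_append.2 (Or.inl hm))
        have := hclo u' hu'r (by
          intro hm
          rcases List.mem_cons.1 hm with h' | h'
          · exact hueq h'
          · exact hnq' h') v w hit hk hv hne
        exact (h2 v).2 (Or.inl this)

-- ----- main equivalence -----

theorem main_equiv (start end_ : Int) (graph : List (Int × List (Int × Int)))
    (ms : Option Int) (visited : List Int) :
    find_strongest_path start end_ graph ms visited =
      find_strongest_path_alt start end_ graph ms visited := by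
  simp only [find_strongest_path, find_strongest_path_alt]
  set g := PySem.Dict.ofList (graph.map (fun p => (p.1, PySem.Dict.ofList p.2))) with hgdef
  set vis0 := PySem.Set.ofList visited with hvdef
  by_cases h1 : start = end_
  · subst h1
    rw [findA_base, if_pos rfl]
  · rw [if_neg h1]
    by_cases h2 : (!(g.contains start) || PySem.Set.contains vis0 start) = true
    · rw [if_pos h2, findA, if_neg h1, dif_pos h2]
    · have h2' := Bool.eq_false_iff.2 h2
      rw [if_neg h2]
      have hg : InnerNodup g := innerNodup_ofGraph graph
      obtain ⟨hcu, hvu⟩ := (guard_false_iff g start vis0).1 h2'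
      have hstart_not : start ∉ vis0 := (pv_contains_false_iff _ _).1 hvu
      obtain ⟨hR1, hRclo⟩ := bfsB_spec g end_ vis0 [start] (PySem.Set.ofList [start]) [start]
        (fun x => by rw [PySem.Set.mem_ofList]) (fun x hx => hx)
        (fun u hu hnq => absurd hu hnq)
      have hstartR : start ∈ bfsB g end_ vis0 [start] (PySem.Set.ofList [start]) [start] :=
        hR1 start List.mem_cons_self
      rw [foldl_range_iterate
        (stepB g end_ vis0 (bfsB g end_ vis0 [start] (PySem.Set.ofList [start]) [start]))
        PySem.Dict.empty
        (bfsB g end_ vis0 [start] (PySem.Set.ofList [start]) [start]).length]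
      have hiter : (stepB g end_ vis0
            (bfsB g end_ vis0 [start] (PySem.Set.ofList [start]) [start]))^[
              (bfsB g end_ vis0 [start] (PySem.Set.ofList [start]) [start]).length]
            PySem.Dict.empty =
          iterB g end_ vis0 (bfsB g end_ vis0 [start] (PySem.Set.ofList [start]) [start])
            (bfsB g end_ vis0 [start] (PySem.Set.ofList [start]) [start]).length := rfl
      rw [hiter]
      set R := bfsB g end_ vis0 [start] (PySem.Set.ofList [start]) [start] with hRdef
      have hKbound : ∀ p, Chain g end_ vis0 start p → p.length ≤ R.length := by
        intro p hch
        have hb1 := chain_lenR g end_ vis0 R hRclo vis0 start p hch hstartR (fun x hx => hx)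
        have hb2 : (R.filter (fun k => !(PySem.Set.contains vis0 k))).length ≤ R.length :=
          List.length_filter_le _ _
        omega
      cases hbs : (iterB g end_ vis0 R R.length).get? start with
      | none =>
        rcases findA_sound g end_ hg
            ((g.keys.filter (fun k => !(PySem.Set.contains vis0 k))).length)
            vis0 start ms (le_refl _) h1 with h0 | ⟨hpos, p, hch, heq⟩
        · exact h0
        · exfalso
          have hnw := chain_to_nw hch (fun x hx => hx)
          obtain ⟨m, hm, _⟩ := (iterB_char g end_ vis0 R hRclo R.length start).2 p hnw
            hstartR (hKbound p hch)
          rw [hbs] at hm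
          cases hm
      | some bs =>
        obtain ⟨p0, hnw0, hlen0, rfl⟩ := (iterB_char g end_ vis0 R hRclo R.length start).1 bs
          hstart_not h1 hbs
        have hub : findA g end_ start ms vis0 ≤
            (if capv ms (ibot p0) > 0 then capv ms (ibot p0) else 0) := by
          rcases findA_sound g end_ hg
              ((g.keys.filter (fun k => !(PySem.Set.contains vis0 k))).length)
              vis0 start ms (le_refl _) h1 with h0 | ⟨hpos, p, hch, heq⟩
          · rw [h0]; split <;> omega
          · have hnw := chain_to_nw hch (fun x hx => hx)
            obtain ⟨m, hm, hle⟩ := (iterB_char g end_ vis0 R hRclo R.length start).2 p hnw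
              hstartR (hKbound p hch)
            rw [hbs] at hm
            have hmeq : ibot p0 = m := Option.some_inj.1 hm
            have hle' : ibot p ≤ ibot p0 := by omega
            have hcap := capv_mono ms hle'
            have hc1 : capb ms p = capv ms (ibot p) := rfl
            rw [heq]
            split
            · omega
            · omega
        have hlb : (if capv ms (ibot p0) > 0 then capv ms (ibot p0) else 0) ≤
            findA g end_ start ms vis0 := by
          split
          · obtain ⟨q, hq1, hq2, hq3, hq4, hq5⟩ :=
              nw_simplify p0.length p0 start (le_refl _) hnw0
            have hch := nw_to_chain vis0 hq1 hq5 hq4 (nw_inter_not_vis hq1)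
              hstart_not (nw_end_not_vis hq1)
            have hge : ibot p0 ≤ ibot q := ibot_subset_le (nw_ne_nil hq1) hq2
            have hcap := capv_mono ms hge
            have hc1 : capb ms q = capv ms (ibot q) := rfl
            have hpos : 0 < capb ms q := by omega
            have hfa := findA_ge g end_ hg vis0 start q ms hch hpos
            omega
          · rcases findA_sound g end_ hg
                ((g.keys.filter (fun k => !(PySem.Set.contains vis0 k))).length)
                vis0 start ms (le_refl _) h1 with h0 | ⟨hpos, _, _, _⟩ <;> omega
        cases ms with
        | none =>
          show findA g end_ start none vis0 = if ibot p0 > 0 then ibot p0 else 0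
          have hcv : capv none (ibot p0) = ibot p0 := rfl
          omega
        | some m =>
          show findA g end_ start (some m) vis0 =
            if min m (ibot p0) > 0 then min m (ibot p0) else 0
          have hcv : capv (some m) (ibot p0) = min m (ibot p0) := rfl
          omega

-- ===== VERDICT (by name: the statement is the Claim_ definition above) =====
theorem find_strongest_path_spec : Claim_equal_find_strongest_path := by
  unfold Claim_equal_find_strongest_path
  intro start end_ graph ms visited _ _
  unfold Spec_find_strongest_path
  exact main_equiv start end_ graph ms visited
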